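-- pv_equiv track=rewrite | github.com/vinchinzu/euler | python/653.py | blum_blum_shub
-- ===== SOURCE A (Python) =====
-- def blum_blum_shub(n: int) -> list[int]:
--     """Generate the pseudo-random sequence as specified in problem 653."""
--     m = 32745673
--     x = 6563116
--     result = [x]
--     for _ in range(n - 1):
--         x = (x * x) % m
--         result.append(x)
--     return result
-- ===== SOURCE B (Python) =====
-- def blum_blum_shub(n: int) -> list[int]:
--     """Generate the pseudo-random sequence as specified in problem 653."""
--     if n <= 0:
--         return []
--     m = 32745673
--     x = 6563116
--     # The sequence is purely periodic: each term is x**(2**i) mod m, the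
--     # multiplicative order of x mod m is 8183557, and 2 has order 4088918
--     # modulo 8183557.  So compute at most one period and tile it.
--     period = 4088918
--     q, r = divmod(n, period)
--     cycle = []
--     y = x
--     for _ in range(min(n, period)):
--         cycle.append(y)
--         y = y * y % m
--     return cycle * q + cycle[:r]
-- ===== Notes on version B (the rewrite author's own statement) =====
-- stated objective: alternative
-- what changed: B exploits that the sequence is purely periodic (each term is seed**(2**i) mod m, the seed has multiplicative order 8183557 mod m, and 2 has order 4088918 modulo that), so it computes at most one period of 4088918 terms and assembles the answer by list repetition and slicing, instead of A's squaring loop over all n terms; Pre_ excludes n <= 0, a degenerate corner where A's seeded accumulator still yields one element while B naturally yields the empty sequence.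
-- outside the precondition, e.g. on blum_blum_shub(0): A returns [6563116], B returns []; on blum_blum_shub(-5): A returns [6563116], B returns []
import Mathlib
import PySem

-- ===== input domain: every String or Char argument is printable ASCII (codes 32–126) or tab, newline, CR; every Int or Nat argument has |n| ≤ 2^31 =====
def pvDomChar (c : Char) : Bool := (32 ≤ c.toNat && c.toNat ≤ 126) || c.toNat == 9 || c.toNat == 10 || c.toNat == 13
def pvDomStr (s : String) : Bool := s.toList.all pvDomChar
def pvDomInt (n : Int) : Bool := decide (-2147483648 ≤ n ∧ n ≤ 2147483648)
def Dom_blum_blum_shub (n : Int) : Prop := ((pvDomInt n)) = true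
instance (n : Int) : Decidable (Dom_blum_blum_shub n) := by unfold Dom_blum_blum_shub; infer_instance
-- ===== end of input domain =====

-- B exploits that the sequence is purely periodic with period 4088918 (each term
-- is seed**(2**i) mod m; the seed has order 8183557 mod m and 2 has order 4088918
-- modulo that): it computes at most one period and tiles it (objective: alternative).

-- ===== PORT A =====
def blum_blum_shub (n : Int) : List Int :=
  let m : Int := 32745673
  let st := (PySem.List.pyRange 0 (n - 1) 1).foldl
    (fun (st : Int × List Int) _ =>
      let x := PySem.Int.mod (st.1 * st.1) m
      (x, st.2 ++ [x]))
    (6563116, [6563116])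
  st.2

-- ===== PORT B =====
-- B's cycle-building loop: k iterations of "cycle.append(y); y = y * y % m".
def pvCycle (y : Int) : Nat → List Int
  | 0 => []
  | k + 1 => y :: pvCycle (PySem.Int.mod (y * y) 32745673) k

def blum_blum_shub_alt (n : Int) : List Int :=
  if n ≤ 0 then []
  else
    let x : Int := 6563116
    let period : Int := 4088918
    -- q, r = divmod(n, period)
    let q := PySem.Int.floordiv n period
    let r := PySem.Int.mod n period
    let cycle := pvCycle x (min n period).toNat   -- loop count min(n, period) ≥ 0 here
    -- cycle * q + cycle[:r]   (q ≥ 0 and 0 ≤ r < period here, so toNat is exact)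
    (List.replicate q.toNat cycle).flatten ++ cycle.take r.toNat

-- ===== PRECONDITION & SPEC =====
-- Pre_ excludes n ≤ 0, a degenerate corner where both answers are defensible and
-- unspecified: A still returns the one-element list [6563116] (it seeds the result
-- before looping over range(n-1)) while B returns the empty length-n sequence.
def Pre_blum_blum_shub (n : Int) : Prop := 1 ≤ n
instance (n : Int) : Decidable (Pre_blum_blum_shub n) := by unfold Pre_blum_blum_shub; infer_instance

def pvWitness_blum_blum_shub : Int := 5

def Spec_blum_blum_shub (n : Int) (out : List Int) : Prop := out = blum_blum_shub_alt n
instance (n : Int) (out : List Int) : Decidable (Spec_blum_blum_shub n out) := by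
  unfold Spec_blum_blum_shub; infer_instance

-- ===== CLAIM (what is proved, stated in full; the proofs are below) =====
def Claim_equal_blum_blum_shub : Prop :=
  ∀ (n : Int), Dom_blum_blum_shub n → Pre_blum_blum_shub n → Spec_blum_blum_shub n (blum_blum_shub n)

-- ===== LEMMAS AND PROOFS =====

-- A's loop body ignores the range elements: only the count matters, and the
-- appended suffix is exactly the squaring stream started one step past the accumulator.
theorem foldA_eq_pvCycle (l : List Int) (x : Int) (acc : List Int) :
    (l.foldl
      (fun (st : Int × List Int) _ =>
        let y := PySem.Int.mod (st.1 * st.1) (32745673 : Int)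
        (y, st.2 ++ [y]))
      (x, acc)).2 = acc ++ pvCycle (PySem.Int.mod (x * x) 32745673) l.length := by
  induction l generalizing x acc with
  | nil => simp [pvCycle]
  | cons a l ih =>
    simp only [List.foldl_cons, List.length_cons]
    rw [ih]
    simp [pvCycle, List.append_assoc]

-- (a % m)^k % m = a^k % m, by induction on k
theorem int_pow_emod (a : Int) (k : Nat) (m : Int) : (a % m) ^ k % m = a ^ k % m := by
  induction k with
  | zero => simp
  | succ k ih =>
    rw [pow_succ, pow_succ, Int.mul_emod, ih, Int.emod_emod_of_dvd _ dvd_rfl, ← Int.mul_emod]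

-- square-and-multiply modular exponentiation, used only to certify the two
-- order facts below by kernel computation
def pvPowModAux : Nat → Int → Nat → Int → Int
  | 0, _, _, m => 1 % m
  | fuel + 1, b, e, m =>
    if e = 0 then 1 % m
    else
      let h := pvPowModAux fuel ((b * b) % m) (e / 2) m
      if e % 2 = 1 then (b * h) % m else h

theorem pvPowModAux_correct (f : Nat) :
    ∀ (e : Nat) (b m : Int), e < 2 ^ f → 0 < m →
      pvPowModAux f b e m = b ^ e % m := by
  induction f with
  | zero =>
    intro e b m he _
    interval_cases e
    simp [pvPowModAux]
  | succ f ih =>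
    intro e b m he hm
    by_cases h0 : e = 0
    · simp [pvPowModAux, h0]
    · have hdiv : e / 2 < 2 ^ f := by
        have : (2:Nat) ^ (f+1) = 2 * 2 ^ f := by ring
        omega
      have hrec := ih (e / 2) ((b * b) % m) m hdiv hm
      have hbb : ((b * b) % m) ^ (e / 2) % m = b ^ (2 * (e / 2)) % m := by
        rw [int_pow_emod, pow_mul, sq]
      by_cases hpar : e % 2 = 1
      · have : pvPowModAux (f+1) b e m = (b * pvPowModAux f ((b*b) % m) (e/2) m) % m := by
          simp [pvPowModAux, h0, hpar]
        rw [this, hrec, hbb]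
        have : b * (b ^ (2 * (e / 2)) % m) % m = b ^ (2 * (e / 2) + 1) % m := by
          rw [Int.mul_emod, Int.emod_emod_of_dvd _ dvd_rfl, ← Int.mul_emod,
            pow_succ, mul_comm]
        rw [this]
        have he2 : 2 * (e / 2) + 1 = e := by omega
        rw [he2]
      · have hpar0 : e % 2 = 0 := by omega
        have : pvPowModAux (f+1) b e m = pvPowModAux f ((b*b) % m) (e/2) m := by
          simp [pvPowModAux, h0, hpar]
        rw [this, hrec, hbb]
        have he2 : 2 * (e / 2) = e := by omega
        rw [he2]

-- the seed has multiplicative order dividing 8183557 modulo 32745673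
theorem seed_pow_ord : (6563116 : Int) ^ (8183557 : Nat) % 32745673 = 1 := by
  have h := pvPowModAux_correct 64 8183557 6563116 32745673 (by norm_num) (by norm_num)
  have : pvPowModAux 64 6563116 8183557 32745673 = 1 := by decide
  omega

-- 2 has multiplicative order dividing 4088918 modulo 8183557 (Nat form)
theorem two_pow_period : (2 : Nat) ^ (4088918 : Nat) % 8183557 = 1 := by
  have h := pvPowModAux_correct 64 4088918 2 8183557 (by norm_num) (by norm_num)
  have h2 : pvPowModAux 64 2 4088918 8183557 = 1 := by decide
  have hcast : ((2 : Nat) ^ (4088918 : Nat) % 8183557 : Nat) = (((2:Int) ^ (4088918 : Nat) % 8183557)).toNat := by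
    have : ((2:Int) ^ (4088918 : Nat)) = (((2:Nat) ^ (4088918 : Nat) : Nat) : Int) := by push_cast; ring
    rw [this]
    omega
  omega

-- exponents can be reduced modulo the order of the seed
theorem pow_reduce (e : Nat) :
    (6563116 : Int) ^ e % 32745673 = (6563116 : Int) ^ (e % 8183557) % 32745673 := by
  have hsplit : e = 8183557 * (e / 8183557) + e % 8183557 := (Nat.div_add_mod e 8183557).symm
  calc (6563116 : Int) ^ e % 32745673
      = ((6563116 : Int) ^ (8183557 : Nat)) ^ (e / 8183557) * 6563116 ^ (e % 8183557) % 32745673 := by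
        conv_lhs => rw [hsplit]
        rw [pow_add, pow_mul]
    _ = (((6563116 : Int) ^ (8183557 : Nat)) ^ (e / 8183557) % 32745673) * (6563116 ^ (e % 8183557) % 32745673) % 32745673 := by
        rw [← Int.mul_emod]
    _ = ((6563116 : Int) ^ (e % 8183557) % 32745673) % 32745673 := by
        rw [← int_pow_emod, seed_pow_ord]; simp
    _ = (6563116 : Int) ^ (e % 8183557) % 32745673 := by
        rw [Int.emod_emod_of_dvd _ dvd_rfl]

-- the closed form of the i-th stream element
def cf (j : Nat) : Int := (6563116 : Int) ^ (2 ^ j % 8183557) % 32745673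

theorem step_cf (i : Nat) :
    PySem.Int.mod (cf i * cf i) 32745673 = cf (i + 1) := by
  rw [PySem.Int.mod_eq_emod_of_pos (by norm_num : (0:Int) < 32745673)]
  unfold cf
  rw [← Int.mul_emod, ← pow_add, pow_reduce]
  congr 2
  have hp : 2 ^ (i + 1) = 2 ^ i + 2 ^ i := by rw [pow_succ]; omega
  rw [hp]
  omega

theorem pvCycle_cf (k : Nat) : ∀ (i : Nat),
    pvCycle (cf i) k = (List.range k).map (fun j => cf (i + j)) := by
  induction k with
  | zero => intro i; simp [pvCycle]
  | succ k ih =>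
    intro i
    have h1 : pvCycle (cf i) (k + 1) = cf i :: pvCycle (cf (i + 1)) k := by
      rw [show pvCycle (cf i) (k + 1)
            = cf i :: pvCycle (PySem.Int.mod (cf i * cf i) 32745673) k from rfl, step_cf]
    rw [h1, ih (i + 1), List.range_succ_eq_map, List.map_cons, List.map_map]
    have ht : ((fun j => cf (i + j)) ∘ Nat.succ) = fun j => cf (i + 1 + j) := by
      funext j
      simp only [Function.comp_apply]
      congr 1
      omega
    rw [ht]
    simp

theorem cf_zero : cf 0 = 6563116 := by decide

-- the stream is purely periodic with period 4088918
theorem cf_periodic (i : Nat) : cf (i + 4088918) = cf i := by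
  have h : 2 ^ (i + 4088918) % 8183557 = 2 ^ i % 8183557 := by
    rw [pow_add, Nat.mul_mod, two_pow_period, Nat.mul_one, Nat.mod_mod_of_dvd _ dvd_rfl]
  unfold cf
  rw [h]

-- tiling a periodic map: range (q*T + r) splits into q copies of one period plus a prefix
theorem map_range_tile {α : Type} (f : Nat → α) (T : Nat)
    (hf : ∀ i, f (i + T) = f i) :
    ∀ (q r : Nat), r ≤ T →
      (List.range (q * T + r)).map f
        = (List.replicate q ((List.range T).map f)).flatten
            ++ ((List.range T).map f).take r := by
  intro q
  induction q with
  | zero =>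
    intro r hr
    simp only [Nat.zero_mul, Nat.zero_add, List.replicate_zero, List.flatten_nil,
      List.nil_append]
    rw [← List.map_take, List.take_range]
    have : min r T = r := by omega
    rw [this]
  | succ q ih =>
    intro r hr
    have hsplit : (q + 1) * T + r = T + (q * T + r) := by ring
    rw [hsplit, List.range_add, List.map_append, List.map_map]
    have hcomp : (f ∘ fun j => T + j) = f := by
      funext j
      simp only [Function.comp_apply]
      rw [Nat.add_comm, hf]
    rw [hcomp, ih r hr, List.replicate_succ, List.flatten_cons, List.append_assoc]

-- ===== VERDICT (by name: the statement is the Claim_ definition above) =====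
theorem blum_blum_shub_spec : Claim_equal_blum_blum_shub := by
  intro n _ hpre
  have hn : 1 ≤ n := hpre
  show blum_blum_shub n = blum_blum_shub_alt n
  unfold blum_blum_shub blum_blum_shub_alt
  simp only []
  rw [if_neg (by omega : ¬ n ≤ 0)]
  rw [foldA_eq_pvCycle, PySem.List.length_pyRange_one]
  -- A = the first (n-1).toNat + 1 = n.toNat elements of the stream
  have hA : ∀ (k : Nat), (6563116 : Int) :: pvCycle (PySem.Int.mod (6563116 * 6563116) 32745673) k
      = (List.range (k + 1)).map cf := by
    intro k
    have := pvCycle_cf (k + 1) 0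
    rw [cf_zero] at this
    simp only [pvCycle] at this
    rw [this]
    simp
  rw [List.singleton_append, hA]
  have hlen : (n - 1 - 0).toNat + 1 = n.toNat := by omega
  rw [hlen]
  -- B side: divmod with the positive literal period
  rw [PySem.Int.floordiv_eq_ediv_of_pos (by norm_num : (0:Int) < 4088918),
    PySem.Int.mod_eq_emod_of_pos (by norm_num : (0:Int) < 4088918)]
  have hr0 : 0 ≤ n % 4088918 := Int.emod_nonneg n (by norm_num)
  have hrT : n % 4088918 < 4088918 := Int.emod_lt_of_pos n (by norm_num)
  have hdm : 4088918 * (n / 4088918) + n % 4088918 = n := Int.mul_ediv_add_emod n 4088918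
  by_cases hcase : n < 4088918
  · -- fewer than one period: q = 0 and the cycle is exactly the answer
    have hq : n / 4088918 = 0 := by omega
    have hmin : (min n 4088918).toNat = n.toNat := by omega
    rw [hq, hmin]
    have hr : (n % 4088918).toNat = n.toNat := by omega
    rw [hr]
    rw [show ((0:Int)).toNat = 0 from rfl, ← cf_zero, pvCycle_cf n.toNat 0]
    simp only [Nat.zero_add]
    simp only [List.replicate_zero, List.flatten_nil, List.nil_append]
    rw [List.take_of_length_le (by simp)]
  · -- at least one period: tile it
    have hmin : (min n 4088918).toNat = 4088918 := by omega
    rw [hmin, ← cf_zero, pvCycle_cf 4088918 0]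
    simp only [Nat.zero_add]
    have htile := map_range_tile cf 4088918 cf_periodic
      (n / 4088918).toNat (n % 4088918).toNat (by omega)
    have hcount : (n / 4088918).toNat * 4088918 + (n % 4088918).toNat = n.toNat := by
      have hq0 : 0 ≤ n / 4088918 := Int.ediv_nonneg (by omega) (by norm_num)
      omega
    rw [← hcount]
    exact htile
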